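-- pv_equiv track=rewrite | github.com/slavah8/leetcode | 2290-removing-minimum-number-of-magic-beans/2290-removing-minimum-number-of-magic-beans.py | minimumRemoval
-- ===== SOURCE A (Python) =====
-- from typing import List
--
-- def minimumRemoval(beans: List[int]) -> int:
--     beans.sort()
--
--
--     n = len(beans)
--
--     prefix = [0] * (n + 1)
--     for i, x in enumerate(beans, 1):
--         prefix[i] = prefix[i - 1] + x
--
--     INF = 10 ** 10
--     best = INF
--     total_sum = prefix[n]
--     for i, t in enumerate(beans):
--         # make everything to the left zero
--         left_cost = prefix[i]
--
--         # make everything to the right t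
--         right_sum = total_sum - prefix[i]
--         right_cnt = n - i
--         right_cost = right_sum - right_cnt * t
--         best = min(best, left_cost + right_cost)
--     return best
-- ===== SOURCE B (Python) =====
-- from collections import Counter
--
-- def minimumRemoval(beans):
--     beans.sort()  # kept: A sorts its argument in place, B performs the same mutation
--     total = sum(beans)
--     cnt = Counter(beans)
--     best = 10 ** 10
--     ge = len(beans)  # number of beans with value >= v
--     for v in sorted(cnt):
--         c = cnt[v]
--         # keeping level v: cost is linear in which bean of v's block survives,
--         # so the best choice is at one end of the block
--         best = min(best, total - max(v * ge, v * (ge - c + 1)))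
--         ge -= c
--     return best
-- ===== Notes on version B (the rewrite author's own statement) =====
-- stated objective: alternative
-- what changed: B replaces A's per-index scan with prefix sums by a per-distinct-value scan: it builds a Counter, iterates over the sorted distinct values maintaining a suffix count ge, and minimizes total - max(v*ge, v*(ge-c+1)), the best candidate inside each block of equal values being at one of its ends.
import Mathlib
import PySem

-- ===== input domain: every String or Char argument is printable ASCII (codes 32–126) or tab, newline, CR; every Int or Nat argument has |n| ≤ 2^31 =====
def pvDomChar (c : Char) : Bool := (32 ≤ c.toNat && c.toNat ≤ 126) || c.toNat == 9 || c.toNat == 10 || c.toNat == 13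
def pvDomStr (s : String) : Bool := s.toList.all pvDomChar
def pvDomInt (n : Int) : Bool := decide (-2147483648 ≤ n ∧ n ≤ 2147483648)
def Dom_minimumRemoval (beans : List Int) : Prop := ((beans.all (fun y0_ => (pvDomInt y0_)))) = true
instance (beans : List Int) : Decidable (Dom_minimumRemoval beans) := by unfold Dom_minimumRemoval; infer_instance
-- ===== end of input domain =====

-- B groups equal values with a Counter and scans the sorted distinct values once
-- (objective: alternative decomposition; both sort their argument in place).

-- ===== PORT A =====
-- Port of A: sort, build a prefix-sum table, then scan indices computing left_cost + right_cost.
def minimumRemoval (beans : List Int) : Int :=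
  let srt := PySem.List.sorted beans (fun x => x) false
  let n : Int := srt.length
  let pfx : List Int := srt.foldl (fun p x => p ++ [p.getLastD 0 + x]) [0]
  let total_sum : Int := pfx.getD srt.length 0
  (PySem.List.enumerate srt 0).foldl
    (fun best it =>
      let i := it.1
      let t := it.2
      let left_cost := pfx.getD i.toNat 0
      let right_sum := total_sum - left_cost
      let right_cnt := n - i
      let right_cost := right_sum - right_cnt * t
      min best (left_cost + right_cost))
    (10 ^ 10)

-- ===== PORT B =====
-- B: sort, Counter(beans), then one pass over the sorted distinct values keeping a
-- suffix count ge; per value the best surviving bean of its block is at a block end.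
def minimumRemoval_alt (beans : List Int) : Int :=
  let srt := PySem.List.sorted beans (fun x => x) false
  let total : Int := srt.sum
  let cnt := PySem.Dict.counter srt
  ((PySem.List.sorted cnt.keys (fun x => x) false).foldl
      (fun s v =>
        let c := cnt.getD v 0
        (min s.1 (total - max (v * s.2) (v * (s.2 - c + 1))), s.2 - c))
      ((10 ^ 10 : Int), (srt.length : Int))).1

-- ===== PRECONDITION & SPEC =====
def Spec_minimumRemoval (beans : List Int) (out : Int) : Prop := out = minimumRemoval_alt beans
instance (beans : List Int) (out : Int) : Decidable (Spec_minimumRemoval beans out) := by unfold Spec_minimumRemoval; infer_instance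

-- ===== CLAIM (what is proved, stated in full; the proofs are below) =====
def Claim_equal_minimumRemoval : Prop := ∀ (beans : List Int), Dom_minimumRemoval beans → Spec_minimumRemoval beans (minimumRemoval beans)

-- ===== LEMMAS AND PROOFS =====

-- The prefix-building fold: final length and final last element (= initial last + sum).
theorem pfx_build (l acc : List Int) :
    (l.foldl (fun p x => p ++ [p.getLastD 0 + x]) acc).length = acc.length + l.length ∧
    (l.foldl (fun p x => p ++ [p.getLastD 0 + x]) acc).getLastD 0 = acc.getLastD 0 + l.sum := by
  induction l generalizing acc with
  | nil => simp
  | cons x xs ih =>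
    obtain ⟨h1, h2⟩ := ih (acc ++ [acc.getLastD 0 + x])
    constructor
    · simp only [List.foldl_cons]; rw [h1]; simp; omega
    · simp only [List.foldl_cons]
      rw [h2]
      simp
      ring

theorem getD_last (r : List Int) (k : Nat) (hk : r.length = k + 1) :
    r.getD k 0 = r.getLastD 0 := by
  have hne : r ≠ [] := by intro h; simp [h] at hk
  rw [List.getD_eq_getElem r 0 (by omega)]
  rw [List.getLastD_eq_getLast?, List.getLast?_eq_getElem?,
    List.getElem?_eq_getElem (by omega)]
  simp only [Option.getD_some]
  congr 1
  omega

-- total_sum in A equals the plain sum of the sorted list.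
theorem total_eq (l : List Int) :
    (l.foldl (fun p x => p ++ [p.getLastD 0 + x]) [0]).getD l.length 0 = l.sum := by
  obtain ⟨h1, h2⟩ := pfx_build l [0]
  rw [getD_last _ _ (by rw [h1]; simp; omega), h2]
  simp

-- A sorted list starts with a maximal block of copies of its head.
theorem sorted_head_block (v : Int) (xs : List Int)
    (h : (v :: xs).Pairwise (· ≤ ·)) :
    ∃ (c : Nat) (r : List Int), v :: xs = List.replicate c v ++ r ∧ 1 ≤ c ∧
      (∀ u ∈ r, v < u) ∧ r.Pairwise (· ≤ ·) := by
  induction xs generalizing v with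
  | nil => exact ⟨1, [], by simp, le_refl 1, by simp, by simp⟩
  | cons y ys ih =>
    have hvy : v ≤ y := (List.pairwise_cons.1 h).1 y (by simp)
    have htail : (y :: ys).Pairwise (· ≤ ·) := (List.pairwise_cons.1 h).2
    rcases eq_or_lt_of_le hvy with heq | hlt
    · subst heq
      obtain ⟨c, r, hdec, hc, hgt, hr⟩ := ih v htail
      exact ⟨c + 1, r, by simp [List.replicate_succ, hdec], by omega, hgt, hr⟩
    · refine ⟨1, y :: ys, by simp, le_refl 1, ?_, htail⟩
      intro u hu
      rcases List.mem_cons.1 hu with rfl | hu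
      · exact hlt
      · exact lt_of_lt_of_le hlt ((List.pairwise_cons.1 htail).1 u hu)

-- sorted distinct values of a block-headed list = head :: sorted distinct values of the rest.
theorem sorted_keys_block (v : Int) (c : Nat) (r : List Int) (hc : 1 ≤ c)
    (hgt : ∀ u ∈ r, v < u) :
    PySem.List.sorted (PySem.Set.ofList (List.replicate c v ++ r)) (fun x => x) false
      = v :: PySem.List.sorted (PySem.Set.ofList r) (fun x => x) false := by
  apply PySem.List.sorted_eq_of_perm_of_pairwise_lt
  · -- permutation: both are nodup with the same members
    apply List.perm_of_nodup_nodup_toFinset_eq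
    · refine List.Nodup.cons ?_ ?_
      · intro hv
        have hvr : v ∈ r := (PySem.Set.mem_ofList _ _).1 ((PySem.List.mem_sorted _ _ _ _).1 hv)
        exact lt_irrefl v (hgt v hvr)
      · exact (PySem.List.sorted_perm _ _ _).nodup_iff.2 (PySem.Set.nodup_ofList r)
    · exact PySem.Set.nodup_ofList _
    · ext u
      simp only [List.toFinset_cons, Finset.mem_insert, List.mem_toFinset,
        PySem.List.mem_sorted, PySem.Set.mem_ofList, List.mem_append,
        List.mem_replicate]
      constructor
      · rintro (rfl | hu)
        · exact Or.inl ⟨by omega, rfl⟩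
        · exact Or.inr hu
      · rintro (⟨-, rfl⟩ | hu)
        · exact Or.inl rfl
        · exact Or.inr hu
  · -- strictly increasing
    refine List.pairwise_cons.2 ⟨?_, PySem.List.sorted_ofList_pairwise_lt r⟩
    intro u hu
    exact hgt u ((PySem.Set.mem_ofList _ _).1 ((PySem.List.mem_sorted _ _ _ _).1 hu))

-- Folding A's per-index candidate over one block of c equal values v collapses to
-- a single min with the block's two end candidates.
theorem block_fold (total v : Int) (c : Nat) (hc : 1 ≤ c) :
    ∀ (s n acc : Int),
      (PySem.List.enumerate (List.replicate c v) s).foldl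
        (fun b p => min b (total - (n - p.1) * p.2)) acc
      = min acc (total - max (v * (n - s)) (v * (n - s - c + 1))) := by
  induction c with
  | zero => omega
  | succ c ih =>
    intro s n acc
    rcases Nat.eq_or_lt_of_le hc with h1 | h1
    · -- c + 1 = 1, i.e. c = 0
      have : c = 0 := by omega
      subst this
      simp only [List.replicate_succ, List.replicate_zero, PySem.List.enumerate_cons,
        PySem.List.enumerate_nil, List.foldl_cons, List.foldl_nil]
      have e1 : n - s - ((0 : Nat) + 1 : Nat) + 1 = n - s := by push_cast; ring
      rw [e1, max_self, mul_comm]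
    · have hc' : 1 ≤ c := by omega
      rw [List.replicate_succ, PySem.List.enumerate_cons, List.foldl_cons,
        ih hc' (s + 1) n (min acc (total - (n - s) * v))]
      have hmid : v * (n - s - 1) ≤ max (v * (n - s)) (v * (n - s - (c : Int))) := by
        rcases le_total 0 v with hv | hv
        · exact le_max_of_le_left (by nlinarith)
        · exact le_max_of_le_right (by nlinarith)
      push_cast
      have e1 : n - (s + 1) = n - s - 1 := by ring
      have e2 : n - s - 1 - (c : Int) + 1 = n - s - (c : Int) := by ring
      have e3 : n - s - ((c : Int) + 1) + 1 = n - s - (c : Int) := by ring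
      rw [e1, e2, e3, mul_comm (n - s) v]
      generalize v * (n - s) = A0 at hmid ⊢
      generalize v * (n - s - 1) = A1 at hmid ⊢
      generalize v * (n - s - (c : Int)) = Ac at hmid ⊢
      omega

-- Main lemma: on a sorted list, A's per-index scan equals B's per-distinct-value scan.
theorem main_lemma : ∀ (N : Nat) (xs : List Int), xs.length ≤ N →
    xs.Pairwise (· ≤ ·) →
    ∀ (s acc total : Int),
      (PySem.List.enumerate xs s).foldl
        (fun b p => min b (total - ((s + xs.length) - p.1) * p.2)) acc
      = ((PySem.List.sorted (PySem.Set.ofList xs) (fun x => x) false).foldl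
          (fun q u =>
            (min q.1 (total - max (u * q.2) (u * (q.2 - xs.count u + 1))),
              q.2 - xs.count u))
          (acc, (xs.length : Int))).1 := by
  intro N
  induction N with
  | zero =>
    intro xs hlen _ s acc total
    have : xs = [] := List.length_eq_zero_iff.1 (by omega)
    subst this
    simp [PySem.List.enumerate, PySem.Set.ofList, PySem.List.sorted]
  | succ N ih =>
    intro xs hlen hs s acc total
    match xs, hs with
    | [], _ => simp [PySem.List.enumerate, PySem.Set.ofList, PySem.List.sorted]
    | v :: t, hs =>
      obtain ⟨c, r, hdec, hc, hgt, hr⟩ := sorted_head_block v t hs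
      rw [hdec]
      have hvnr : v ∉ r := fun hm => lt_irrefl v (hgt v hm)
      have hcount : (List.replicate c v ++ r).count v = c := by
        rw [List.count_append, List.count_replicate]
        simp [List.count_eq_zero_of_not_mem hvnr]
      have hcount' : ∀ u ∈ r, (List.replicate c v ++ r).count u = r.count u := by
        intro u hu
        rw [List.count_append, List.count_replicate]
        have hne' : ¬ (v = u) := fun h => lt_irrefl v (h ▸ hgt u hu)
        simp [beq_iff_eq, hne']
      have hlenapp : (List.replicate c v ++ r).length = c + r.length := by simp
      -- left side: split the enumerate at the block
      rw [PySem.List.enumerate_append, List.foldl_append]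
      have hlen2 : (List.replicate c v).length = c := by simp
      rw [hlen2]
      rw [block_fold total v c hc s (s + ((List.replicate c v ++ r).length : Int)) acc]
      -- right side: split the sorted keys
      rw [sorted_keys_block v c r hc hgt, List.foldl_cons]
      -- simplify the head step of the B fold
      have hrlen : r.length ≤ N := by
        have := hdec ▸ hlen
        simp at this
        omega
      have hshift : (s + ((List.replicate c v ++ r).length : Int)) = (s + c) + (r.length : Int) := by
        rw [hlenapp]; push_cast; ring
      -- rewrite the body of the remaining enumerate fold to use s + c as start
      have hbody :
          (PySem.List.enumerate r (s + (c : Int))).foldl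
            (fun b p => min b (total - ((s + ((List.replicate c v ++ r).length : Int)) - p.1) * p.2))
            (min acc (total - max (v * ((s + ((List.replicate c v ++ r).length : Int)) - s))
              (v * ((s + ((List.replicate c v ++ r).length : Int)) - s - c + 1))))
          = (PySem.List.enumerate r (s + (c : Int))).foldl
            (fun b p => min b (total - (((s + (c:Int)) + (r.length : Int)) - p.1) * p.2))
            (min acc (total - max (v * ((s + ((List.replicate c v ++ r).length : Int)) - s))
              (v * ((s + ((List.replicate c v ++ r).length : Int)) - s - c + 1)))) := by
        rw [hshift]
      rw [hbody, ih r hrlen hr (s + (c : Int)) _ total]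
      -- now both sides are B-style folds over (sorted keys of r); align step functions and inits
      rw [hcount]
      have hstep :
          ∀ (q : Int × Int),
          ((PySem.List.sorted (PySem.Set.ofList r) (fun x => x) false).foldl
            (fun q u => (min q.1 (total - max (u * q.2) (u * (q.2 - r.count u + 1))), q.2 - r.count u)) q).1
          = ((PySem.List.sorted (PySem.Set.ofList r) (fun x => x) false).foldl
            (fun q u => (min q.1 (total - max (u * q.2) (u * (q.2 - (List.replicate c v ++ r).count u + 1))), q.2 - (List.replicate c v ++ r).count u)) q).1 := by
        intro q
        congr 1
        apply PySem.List.foldl_congr_mem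
        intro acc' u hu
        have hur : u ∈ r := (PySem.Set.mem_ofList _ _).1 ((PySem.List.mem_sorted _ _ _ _).1 hu)
        rw [hcount' u hur]
      rw [hstep]
      congr 1
      congr 1
      refine Prod.ext ?_ ?_
      · simp only []
        rw [hlenapp]
        push_cast
        ring_nf
      · simp only []
        rw [hlenapp]
        push_cast
        ring

-- ===== VERDICT (by name: the statement is the Claim_ definition above) =====
theorem minimumRemoval_spec : Claim_equal_minimumRemoval := by
  intro beans _
  unfold Spec_minimumRemoval minimumRemoval minimumRemoval_alt
  simp only []
  set l := PySem.List.sorted beans (fun x => x) false with hl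
  have hsorted : l.Pairwise (· ≤ ·) := PySem.List.sorted_pairwise beans (fun x => x)
  -- A side: cancel the prefix table, leaving the per-index candidate
  have hA :
      (PySem.List.enumerate l 0).foldl
        (fun best it =>
          min best ((l.foldl (fun p x => p ++ [p.getLastD 0 + x]) [0]).getD it.1.toNat 0 +
            ((l.foldl (fun p x => p ++ [p.getLastD 0 + x]) [0]).getD l.length 0 -
              (l.foldl (fun p x => p ++ [p.getLastD 0 + x]) [0]).getD it.1.toNat 0 -
              ((l.length : Int) - it.1) * it.2)))
        (10 ^ 10)
      = (PySem.List.enumerate l 0).foldl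
        (fun b p => min b (l.sum - ((0 + (l.length : Int)) - p.1) * p.2)) (10 ^ 10) := by
    rw [total_eq]
    congr 1
    funext b p
    congr 1
    ring
  rw [hA, main_lemma l.length l (le_refl _) hsorted 0 (10 ^ 10) l.sum]
  simp only [PySem.Dict.keys_counter, PySem.Dict.getD_counter]
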